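-- pv_equiv track=rewrite | github.com/NylaWorker/ComparissonCode | DrawDataReader.py | JsonStampCounter
-- ===== SOURCE A (Python) =====
-- def JsonStampCounter(SingleJson):
-- 	Wheelcounter = 0
-- 	Carbodycounter = 0
-- 	Ballooncounter = 0
-- 	Rubberbandcounter = 0
-- 	keyErr = 0
-- 	for i in range(len(SingleJson)):
-- 		try:
-- 			src = SingleJson[i]['src']
-- 			#I split the string with the link in order to be able to check what stamp is being used.
-- 			feautures = src.split('/')
-- 			if feautures[6] == 'Wheel.png':
-- 				Wheelcounter = Wheelcounter + 1
-- 			if feautures[6] == 'carbody_short.png':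
-- 				Carbodycounter = Carbodycounter + 1
-- 			if feautures[6] == 'Balloon.png':
-- 				Ballooncounter = Ballooncounter + 1
-- 			if feautures[6] == 'rubberband.png':
-- 				Rubberbandcounter = Rubberbandcounter+ 1
-- 		except KeyError:
-- 			keyErr = keyErr + 1
-- 	return [Wheelcounter,Carbodycounter,Ballooncounter,Rubberbandcounter]
-- ===== SOURCE B (Python) =====
-- def JsonStampCounter(SingleJson):
--     collected = []
--     for i in range(len(SingleJson)):
--         try:
--             src = SingleJson[i]['src']
--             collected.append(src.split('/')[6])
--         except KeyError:
--             continue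
--     return [collected.count('Wheel.png'),
--             collected.count('carbody_short.png'),
--             collected.count('Balloon.png'),
--             collected.count('rubberband.png')]
-- ===== Notes on version B (the rewrite author's own statement) =====
-- stated objective: alternative
-- what changed: Replaces the single-pass four-counter accumulation with collecting the 7th path component of every src into a list and then answering with four separate .count scans over that list.
import Mathlib
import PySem

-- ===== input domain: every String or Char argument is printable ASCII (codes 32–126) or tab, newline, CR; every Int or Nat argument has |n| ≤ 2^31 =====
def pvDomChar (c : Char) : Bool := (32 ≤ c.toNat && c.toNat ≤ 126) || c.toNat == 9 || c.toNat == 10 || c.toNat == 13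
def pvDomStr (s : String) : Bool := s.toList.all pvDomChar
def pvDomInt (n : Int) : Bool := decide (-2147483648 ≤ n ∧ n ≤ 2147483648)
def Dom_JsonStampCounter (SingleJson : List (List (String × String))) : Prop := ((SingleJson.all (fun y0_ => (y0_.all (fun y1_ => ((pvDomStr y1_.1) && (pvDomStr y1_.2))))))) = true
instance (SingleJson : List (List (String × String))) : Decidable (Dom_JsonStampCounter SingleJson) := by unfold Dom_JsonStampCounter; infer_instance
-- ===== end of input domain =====

-- B replaces A's single-pass four-counter accumulation by collecting the 7th path component
-- of every 'src' into a list and answering with four separate count scans (alternative decomposition).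

-- ===== PORT A =====
-- A's loop: five integer counters threaded through the list; 'except KeyError' = the none branch
-- of the 'src' lookup; feautures[6] = pyGetD (Pre_ keeps the index in range, where Python returns).
def JsonStampCounter (SingleJson : List (List (String × String))) : List Int :=
  let st := SingleJson.foldl
    (fun (st : Int × Int × Int × Int × Int) item =>
      match item.lookup "src" with
      | none => (st.1, st.2.1, st.2.2.1, st.2.2.2.1, st.2.2.2.2 + 1)
      | some src =>
        let feautures := PySem.Chars.splitOn src.toList "/".toList
        let w := if PySem.List.pyGetD feautures 6 [] = "Wheel.png".toList then st.1 + 1 else st.1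
        let c := if PySem.List.pyGetD feautures 6 [] = "carbody_short.png".toList then st.2.1 + 1 else st.2.1
        let b := if PySem.List.pyGetD feautures 6 [] = "Balloon.png".toList then st.2.2.1 + 1 else st.2.2.1
        let r := if PySem.List.pyGetD feautures 6 [] = "rubberband.png".toList then st.2.2.2.1 + 1 else st.2.2.2.1
        (w, c, b, r, st.2.2.2.2))
    (0, 0, 0, 0, 0)
  [st.1, st.2.1, st.2.2.1, st.2.2.2.1]

-- ===== PORT B =====
def JsonStampCounter_alt (SingleJson : List (List (String × String))) : List Int :=
  let collected := SingleJson.foldl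
    (fun (acc : List (List Char)) item =>
      match item.lookup "src" with
      | none => acc
      | some src => acc ++ [PySem.List.pyGetD (PySem.Chars.splitOn src.toList "/".toList) 6 []])
    []
  [(collected.count "Wheel.png".toList : Int), (collected.count "carbody_short.png".toList : Int),
   (collected.count "Balloon.png".toList : Int), (collected.count "rubberband.png".toList : Int)]

-- ===== PRECONDITION & SPEC =====
-- Pre_ excludes exactly the inputs where Python A raises an uncaught IndexError:
-- an element whose 'src' value splits into fewer than 7 '/'-separated parts.
def Pre_JsonStampCounter (SingleJson : List (List (String × String))) : Prop :=
  ∀ item ∈ SingleJson,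
    ((item.lookup "src").all (fun src => 7 ≤ (PySem.Chars.splitOn src.toList "/".toList).length)) = true
instance (SingleJson : List (List (String × String))) : Decidable (Pre_JsonStampCounter SingleJson) := by
  unfold Pre_JsonStampCounter; infer_instance

def pvWitness_JsonStampCounter : (List (List (String × String))) :=
  [[("src", "0/1/2/3/4/5/Wheel.png")], [("a", "b")]]

def Spec_JsonStampCounter (SingleJson : List (List (String × String))) (out : List Int) : Prop := out = JsonStampCounter_alt SingleJson
instance (SingleJson : List (List (String × String))) (out : List Int) : Decidable (Spec_JsonStampCounter SingleJson out) := by unfold Spec_JsonStampCounter; infer_instance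

-- ===== CLAIM (what is proved, stated in full; the proofs are below) =====
def Claim_equal_JsonStampCounter : Prop := ∀ (SingleJson : List (List (String × String))), Dom_JsonStampCounter SingleJson → Pre_JsonStampCounter SingleJson → Spec_JsonStampCounter SingleJson (JsonStampCounter SingleJson)

-- ===== LEMMAS AND PROOFS =====

-- the token each src-bearing element contributes
def pvTok (item : List (String × String)) : Option (List Char) :=
  (item.lookup "src").map (fun src => PySem.List.pyGetD (PySem.Chars.splitOn src.toList "/".toList) 6 [])

lemma collect_eq (xs : List (List (String × String))) (acc : List (List Char)) :
    xs.foldl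
      (fun (acc : List (List Char)) item =>
        match item.lookup "src" with
        | none => acc
        | some src => acc ++ [PySem.List.pyGetD (PySem.Chars.splitOn src.toList "/".toList) 6 []]) acc
    = acc ++ xs.filterMap pvTok := by
  induction xs generalizing acc with
  | nil => simp
  | cons x xs ih =>
    cases h : x.lookup "src" with
    | none =>
      have hx : pvTok x = none := by simp [pvTok, h]
      simp only [List.foldl_cons, List.filterMap_cons, hx, h]
      exact ih acc
    | some src =>
      have hx : pvTok x = some (PySem.List.pyGetD (PySem.Chars.splitOn src.toList "/".toList) 6 []) := by
        simp [pvTok, h]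
      simp only [List.foldl_cons, List.filterMap_cons, hx, h]
      rw [ih]
      simp

lemma foldA_inv (xs : List (List (String × String))) (w c b r k : Int) :
    xs.foldl
      (fun (st : Int × Int × Int × Int × Int) item =>
        match item.lookup "src" with
        | none => (st.1, st.2.1, st.2.2.1, st.2.2.2.1, st.2.2.2.2 + 1)
        | some src =>
          let feautures := PySem.Chars.splitOn src.toList "/".toList
          let w := if PySem.List.pyGetD feautures 6 [] = "Wheel.png".toList then st.1 + 1 else st.1
          let c := if PySem.List.pyGetD feautures 6 [] = "carbody_short.png".toList then st.2.1 + 1 else st.2.1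
          let b := if PySem.List.pyGetD feautures 6 [] = "Balloon.png".toList then st.2.2.1 + 1 else st.2.2.1
          let r := if PySem.List.pyGetD feautures 6 [] = "rubberband.png".toList then st.2.2.2.1 + 1 else st.2.2.2.1
          (w, c, b, r, st.2.2.2.2)) (w, c, b, r, k)
    = (w + ((xs.filterMap pvTok).count "Wheel.png".toList : Int),
       c + ((xs.filterMap pvTok).count "carbody_short.png".toList : Int),
       b + ((xs.filterMap pvTok).count "Balloon.png".toList : Int),
       r + ((xs.filterMap pvTok).count "rubberband.png".toList : Int),
       k + (xs.countP (fun item => (item.lookup "src").isNone) : Int)) := by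
  induction xs generalizing w c b r k with
  | nil => simp
  | cons x xs ih =>
    cases h : x.lookup "src" with
    | none =>
      have hx : pvTok x = none := by simp [pvTok, h]
      simp only [List.foldl_cons, List.filterMap_cons, List.countP_cons, hx, h, Option.isNone_none]
      rw [ih]
      simp only [Prod.mk.injEq]
      refine ⟨trivial, trivial, trivial, trivial, ?_⟩
      norm_num
      ring
    | some src =>
      have hx : pvTok x = some (PySem.List.pyGetD (PySem.Chars.splitOn src.toList "/".toList) 6 []) := by
        simp [pvTok, h]
      simp only [List.foldl_cons, List.filterMap_cons, List.countP_cons, hx, h, Option.isNone_some]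
      rw [ih]
      simp only [List.count_cons, beq_iff_eq, Prod.mk.injEq]
      norm_num
      refine ⟨?_, ?_, ?_, ?_⟩ <;> (split_ifs <;> push_cast <;> ring)

-- ===== VERDICT (by name: the statement is the Claim_ definition above) =====
theorem JsonStampCounter_spec : Claim_equal_JsonStampCounter := by
  intro xs _ _
  unfold Spec_JsonStampCounter JsonStampCounter JsonStampCounter_alt
  rw [foldA_inv, collect_eq]
  simp
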